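-- pv_equiv track=rewrite | github.com/gilanglahat22/FrobeniusProblem | src/Algorithm.py | make_GreedyGraph
-- ===== SOURCE A (Python) =====
-- def make_GreedyGraph(Set):
--     """
--     input  : Set Of Integers as the numbers of frobenius Problem that will compute the largest number not a linear combination
--     output : form {node1: {node2: distance, node3: distance, ... }, ...}
--     """
--     graph = {}
--     m = min(Set)
--     for i in range(m):
--         graph[i] = {}
--         for j in Set:
--             if ((i + j) % m not in graph[i]) or (graph[i][(i + j) % m] > j):
--                 graph[i][(i + j) % m] = j
--     return graph
-- ===== SOURCE B (Python) =====
-- def make_GreedyGraph(Set):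
--     m = min(Set)
--     if m <= 0:
--         return {}
--     # Stage 1: distinct residues mod m, in first-occurrence order.
--     order = []
--     seen = set()
--     for j in Set:
--         r = j % m
--         if r not in seen:
--             seen.add(r)
--             order.append(r)
--     # Stage 2: minimum element of each residue class.
--     minj = [(r, min(j for j in Set if j % m == r)) for r in order]
--     # Stage 3: each row i is the min-table with keys shifted by i mod m.
--     return {i: {(i + r) % m: v for r, v in minj} for i in range(m)}
-- ===== Notes on version B (the rewrite author's own statement) =====
-- stated objective: alternative
-- what changed: A updates a dict of dicts with a min-update inner scan of Set per row; B instead stages the work: one pass collecting the distinct residues mod m in first-occurrence order, a min over each residue class, and then every row emitted as a key-shift (i+r) mod m of that single (residue, min) table.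
import Mathlib
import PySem

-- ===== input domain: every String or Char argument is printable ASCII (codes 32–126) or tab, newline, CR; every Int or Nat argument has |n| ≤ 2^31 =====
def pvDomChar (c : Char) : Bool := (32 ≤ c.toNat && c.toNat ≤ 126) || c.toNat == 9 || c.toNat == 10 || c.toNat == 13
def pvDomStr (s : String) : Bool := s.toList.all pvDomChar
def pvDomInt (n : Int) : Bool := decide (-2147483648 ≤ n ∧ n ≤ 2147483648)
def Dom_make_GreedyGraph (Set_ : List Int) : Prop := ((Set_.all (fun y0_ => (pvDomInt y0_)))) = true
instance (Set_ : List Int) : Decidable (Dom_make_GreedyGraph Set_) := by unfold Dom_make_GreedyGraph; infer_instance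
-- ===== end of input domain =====

-- B stages the work — distinct residues mod m in first-occurrence order, then a min per residue
-- class, then each row as a key-shift of that one table — instead of A's per-row min-update dict
-- scans (objective: alternative algorithm; same output).

-- ===== PORT A =====
-- inner loop of A for a fixed row i: for j in Set: if key new or larger, graph[i][(i+j)%m] = j
def pvStepA (m i : Int) (row : PySem.Dict Int Int) (j : Int) : PySem.Dict Int Int :=
  let k := PySem.Int.mod (i + j) m
  match row.get? k with
  | none => row.insert k j
  | some v => if v > j then row.insert k j else row

def make_GreedyGraph (Set_ : List Int) : List (Int × List (Int × Int)) :=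
  match PySem.List.min? Set_ (fun x => x) with
  | none => []  -- Python: min([]) raises ValueError (excluded by Pre_)
  | some m =>
    let graph : PySem.Dict Int (PySem.Dict Int Int) :=
      (PySem.List.pyRange 0 m 1).foldl
        (fun g i => g.insert i (Set_.foldl (pvStepA m i) PySem.Dict.empty)) PySem.Dict.empty
    graph.items.map (fun p => (p.1, p.2.items))

-- ===== PORT B =====
def make_GreedyGraph_alt (Set_ : List Int) : List (Int × List (Int × Int)) :=
  match PySem.List.min? Set_ (fun x => x) with
  | none => []  -- Python: min([]) raises ValueError (excluded by Pre_)
  | some m =>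
    if m ≤ 0 then []
    else
      -- stage 1: distinct residues mod m in first-occurrence order (seen/order loop)
      let order : PySem.Set Int :=
        Set_.foldl (fun s j => PySem.Set.add s (PySem.Int.mod j m)) PySem.Set.empty
      -- stage 2: minimum of each residue class; the class of r ∈ order is nonempty,
      -- so Python's min over the comprehension never raises and .getD 0 is unreachable
      let minj : List (Int × Int) :=
        order.map (fun r =>
          (r, (PySem.List.min? (Set_.filter (fun j => PySem.Int.mod j m == r))
                 (fun x => x)).getD 0))
      -- stage 3: row i = the min-table with keys shifted by i mod m
      (PySem.List.pyRange 0 m 1).map (fun i =>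
        (i, minj.map (fun rv => (PySem.Int.mod (i + rv.1) m, rv.2))))

-- ===== PRECONDITION & SPEC =====
-- Pre_ excludes only the empty list, on which Python's min raises ValueError.
def Pre_make_GreedyGraph (Set_ : List Int) : Prop := Set_ ≠ []
instance (Set_ : List Int) : Decidable (Pre_make_GreedyGraph Set_) := by unfold Pre_make_GreedyGraph; infer_instance
def pvWitness_make_GreedyGraph : List Int := [3, 5]
def Spec_make_GreedyGraph (Set_ : List Int) (out : List (Int × List (Int × Int))) : Prop := out = make_GreedyGraph_alt Set_
instance (Set_ : List Int) (out : List (Int × List (Int × Int))) : Decidable (Spec_make_GreedyGraph Set_ out) := by unfold Spec_make_GreedyGraph; infer_instance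

-- ===== CLAIM (what is proved, stated in full; the proofs are below) =====
def Claim_equal_make_GreedyGraph : Prop := ∀ (Set_ : List Int), Dom_make_GreedyGraph Set_ → Pre_make_GreedyGraph Set_ → Spec_make_GreedyGraph Set_ (make_GreedyGraph Set_)

-- ===== LEMMAS AND PROOFS =====

-- B's three stages, named for the proofs (definitionally what the port computes)
def pvRes (m j : Int) : Int := PySem.Int.mod j m
def pvMin (m : Int) (l : List Int) (r : Int) : Int :=
  (PySem.List.min? (l.filter (fun j => pvRes m j == r)) (fun x => x)).getD 0
def pvMinj (m : Int) (l : List Int) : List (Int × Int) :=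
  (PySem.Set.ofList (l.map (pvRes m))).map (fun r => (r, pvMin m l r))
def pvShift (i m : Int) (l : List (Int × Int)) : List (Int × Int) :=
  l.map (fun rv => (PySem.Int.mod (i + rv.1) m, rv.2))

lemma pv_mod_shift {m : Int} (hm : 0 < m) (i j : Int) :
    PySem.Int.mod (i + j) m = PySem.Int.mod (i + PySem.Int.mod j m) m := by
  rw [PySem.Int.mod_eq_emod_of_pos hm, PySem.Int.mod_eq_emod_of_pos hm,
      PySem.Int.mod_eq_emod_of_pos hm, Int.add_emod i j m, Int.add_emod i (j % m) m,
      Int.emod_emod_of_dvd _ dvd_rfl]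

lemma pv_mod_inj {m i a b : Int} (hm : 0 < m) (ha : 0 ≤ a ∧ a < m) (hb : 0 ≤ b ∧ b < m)
    (h : PySem.Int.mod (i + a) m = PySem.Int.mod (i + b) m) : a = b := by
  rw [PySem.Int.mod_eq_emod_of_pos hm, PySem.Int.mod_eq_emod_of_pos hm] at h
  have hd : m ∣ (a - b) := by
    have h2 : (i + a - (i + b)) % m = ((i + a) % m - (i + b) % m) % m := Int.sub_emod _ _ _
    rw [h, sub_self, Int.zero_emod] at h2
    have : (a - b) % m = 0 := by rw [← h2]; ring_nf
    exact Int.dvd_of_emod_eq_zero this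
  obtain ⟨c, hc⟩ := hd
  have hc0 : c = 0 := by nlinarith [hc, ha.1, ha.2, hb.1, hb.2]
  rw [hc0, mul_zero] at hc
  omega

lemma pv_get?_shift_list (i m : Int) (hm : 0 < m) (l : List (Int × Int))
    (hk : ∀ p ∈ l, 0 ≤ p.1 ∧ p.1 < m) (r : Int) (hr : 0 ≤ r ∧ r < m) :
    (PySem.Dict.mk (pvShift i m l)).get? (PySem.Int.mod (i + r) m)
      = (PySem.Dict.mk l).get? r := by
  induction l with
  | nil => rfl
  | cons p t ih =>
    have hp := hk p (by simp)
    have ht : ∀ q ∈ t, 0 ≤ q.1 ∧ q.1 < m := fun q hq => hk q (by simp [hq])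
    simp only [pvShift, List.map_cons]
    rw [PySem.Dict.get?_mk_cons, PySem.Dict.get?_mk_cons]
    by_cases he : p.1 = r
    · simp [he]
    · have hne : (PySem.Int.mod (i + p.1) m) ≠ (PySem.Int.mod (i + r) m) := by
        intro h; exact he (pv_mod_inj hm hp hr h)
      simp only [beq_iff_eq, if_neg hne, if_neg he]
      exact ih ht

-- lookup in the min-table: present iff the residue occurred
lemma pv_get?_minj (g : Int → Int) (ks : List Int) (x : Int) :
    (PySem.Dict.mk (ks.map (fun r => (r, g r)))).get? x
      = if x ∈ ks then some (g x) else none := by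
  induction ks with
  | nil => rfl
  | cons k t ih =>
    simp only [List.map_cons]
    rw [PySem.Dict.get?_mk_cons]
    by_cases he : k = x
    · simp [he]
    · simp only [beq_iff_eq, if_neg he, ih, List.mem_cons]
      by_cases hx : x ∈ t <;> simp [hx, Ne.symm he]

lemma pv_insert_shift (i m : Int) (hm : 0 < m) (d : PySem.Dict Int Int)
    (hk : ∀ p ∈ d.items, 0 ≤ p.1 ∧ p.1 < m) (r v : Int) (hr : 0 ≤ r ∧ r < m) :
    (PySem.Dict.mk (pvShift i m d.items)).insert (PySem.Int.mod (i + r) m) v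
      = PySem.Dict.mk (pvShift i m (d.insert r v).items) := by
  have hcon : (PySem.Dict.mk (pvShift i m d.items)).contains (PySem.Int.mod (i + r) m)
      = d.contains r := by
    rw [PySem.Dict.contains_eq_isSome_get?, PySem.Dict.contains_eq_isSome_get?,
        pv_get?_shift_list i m hm d.items hk r hr]
  apply PySem.Dict.ext
  by_cases hc : d.contains r = true
  · rw [PySem.Dict.items_insert_of_contains _ v (by rw [hcon]; exact hc),
        PySem.Dict.items_insert_of_contains _ v hc]
    show (pvShift i m d.items).map _ = pvShift i m (d.items.map _)
    simp only [pvShift, List.map_map]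
    refine List.map_congr_left (fun p hp => ?_)
    have hpb := hk p hp
    by_cases he : p.1 = r
    · simp [he]
    · have hne : (PySem.Int.mod (i + p.1) m) ≠ (PySem.Int.mod (i + r) m) := by
        intro h; exact he (pv_mod_inj hm hpb hr h)
      simp [hne, he]
  · rw [PySem.Dict.items_insert_of_not_contains _ v (by rw [hcon]; simpa using hc),
        PySem.Dict.items_insert_of_not_contains _ v (by simpa using hc)]
    show pvShift i m d.items ++ [_] = pvShift i m (d.items ++ [(r, v)])
    simp [pvShift]

-- membership in stage 1's order list
lemma pv_mem_order {m : Int} {t : List Int} {r : Int} :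
    r ∈ PySem.Set.ofList (t.map (pvRes m)) ↔ ∃ j ∈ t, pvRes m j = r := by
  rw [PySem.Set.mem_ofList]
  simp [eq_comm]

-- min over a class extended by one element
lemma pv_min_append (xs : List Int) (hxs : xs ≠ []) (j : Int) :
    (PySem.List.min? (xs ++ [j]) (fun x => x)).getD 0
      = min ((PySem.List.min? xs (fun x => x)).getD 0) j := by
  cases xs with
  | nil => exact absurd rfl hxs
  | cons x t =>
    rw [List.cons_append, PySem.List.min?_id_cons, PySem.List.min?_id_cons]
    simp [List.foldl_append]

-- keys of the min-table are residues, hence in [0, m)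
lemma pv_minj_keys (m : Int) (hm : 0 < m) (l : List Int) :
    ∀ p ∈ pvMinj m l, 0 ≤ p.1 ∧ p.1 < m := by
  intro p hp
  unfold pvMinj at hp
  obtain ⟨r, hr, hpe⟩ := List.mem_map.1 hp
  obtain ⟨j, _, hj⟩ := pv_mem_order.1 hr
  subst hpe
  simp only []
  rw [← hj]
  exact ⟨PySem.Int.mod_nonneg j hm, PySem.Int.mod_lt j hm⟩

-- class filter through appending one element
lemma pv_filter_append (m : Int) (t : List Int) (j r : Int) :
    (t ++ [j]).filter (fun x => pvRes m x == r)
      = t.filter (fun x => pvRes m x == r) ++ (if (pvRes m j == r) = true then [j] else []) := by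
  rw [List.filter_append]
  by_cases h : pvRes m j = r <;> simp [h]

-- the filtered class of a residue in order is nonempty
lemma pv_filter_ne_nil {m : Int} {t : List Int} {r : Int}
    (h : r ∈ PySem.Set.ofList (t.map (pvRes m))) :
    t.filter (fun x => pvRes m x == r) ≠ [] := by
  obtain ⟨j, hj, hjr⟩ := pv_mem_order.1 h
  intro hnil
  have : j ∈ t.filter (fun x => pvRes m x == r) := by
    rw [List.mem_filter]; exact ⟨hj, by simp [hjr]⟩
  simp [hnil] at this

lemma pv_filter_nil {m : Int} {t : List Int} {r : Int}
    (h : r ∉ PySem.Set.ofList (t.map (pvRes m))) :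
    t.filter (fun x => pvRes m x == r) = [] := by
  rw [List.filter_eq_nil_iff]
  intro j hj hjr
  exact h (pv_mem_order.2 ⟨j, hj, by simpa using hjr⟩)

-- pvMinj through appending one element
lemma pv_minj_append (m : Int) (t : List Int) (j : Int) :
    pvMinj m (t ++ [j])
      = if _h : pvRes m j ∈ PySem.Set.ofList (t.map (pvRes m)) then
          (pvMinj m t).map (fun p => if p.1 == pvRes m j then (pvRes m j, min (pvMin m t (pvRes m j)) j) else p)
        else pvMinj m t ++ [(pvRes m j, j)] := by
  unfold pvMinj
  rw [List.map_append, List.map_cons, List.map_nil, PySem.Set.ofList_append_singleton]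
  split_ifs with h
  · rw [PySem.Set.add_of_mem h, List.map_map]
    refine List.map_congr_left (fun r hr => ?_)
    simp only [Function.comp]
    by_cases he : r = pvRes m j
    · subst he
      simp only [beq_self_eq_true, if_pos]
      unfold pvMin
      rw [pv_filter_append]
      simp only [beq_self_eq_true, if_pos]
      rw [pv_min_append _ (pv_filter_ne_nil h) j]
    · have : (r == pvRes m j) = false := by simp [he]
      simp only [this, Bool.false_eq_true, if_false]
      unfold pvMin
      rw [pv_filter_append]
      simp [Ne.symm he]
  · rw [PySem.Set.add_of_not_mem h, List.map_append, List.map_cons, List.map_nil]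
    congr 1
    · refine List.map_congr_left (fun r hr => ?_)
      have hne : pvRes m j ≠ r := fun he => h (he ▸ hr)
      unfold pvMin
      rw [pv_filter_append]
      simp [hne]
    · unfold pvMin
      rw [pv_filter_append, pv_filter_nil h]
      simp [PySem.List.min?_id_cons]

lemma pv_row_eq (m i : Int) (hm : 0 < m) (l : List Int) :
    (l.foldl (pvStepA m i) PySem.Dict.empty).items = pvShift i m (pvMinj m l) := by
  induction l using List.reverseRecOn with
  | nil => rfl
  | append_singleton t j ih =>
    rw [List.foldl_append, List.foldl_cons, List.foldl_nil]
    have hd : t.foldl (pvStepA m i) PySem.Dict.empty = PySem.Dict.mk (pvShift i m (pvMinj m t)) := by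
      apply PySem.Dict.ext; exact ih
    rw [hd]
    have hr' : 0 ≤ pvRes m j ∧ pvRes m j < m :=
      ⟨PySem.Int.mod_nonneg j hm, PySem.Int.mod_lt j hm⟩
    unfold pvStepA
    simp only []
    rw [pv_mod_shift hm i j]
    rw [show PySem.Int.mod (i + PySem.Int.mod j m) m = PySem.Int.mod (i + pvRes m j) m from rfl]
    rw [pv_get?_shift_list i m hm (pvMinj m t) (pv_minj_keys m hm t) (pvRes m j) hr']
    rw [show (pvMinj m t) = (PySem.Set.ofList (t.map (pvRes m))).map (fun r => (r, pvMin m t r)) from rfl]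
    rw [pv_get?_minj]
    rw [pv_minj_append]
    by_cases h : pvRes m j ∈ PySem.Set.ofList (t.map (pvRes m))
    · rw [if_pos h, dif_pos h]
      show (if pvMin m t (pvRes m j) > j then
              (PySem.Dict.mk (pvShift i m (pvMinj m t))).insert (PySem.Int.mod (i + pvRes m j) m) j
            else PySem.Dict.mk (pvShift i m (pvMinj m t))).items
        = pvShift i m ((pvMinj m t).map
            (fun p => if p.1 == pvRes m j then (pvRes m j, min (pvMin m t (pvRes m j)) j) else p))
      by_cases hgt : pvMin m t (pvRes m j) > j
      · rw [if_pos hgt]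
        have hins := pv_insert_shift i m hm (PySem.Dict.mk (pvMinj m t)) (pv_minj_keys m hm t) (pvRes m j) j hr'
        rw [show (PySem.Dict.mk (pvMinj m t)).items = pvMinj m t from rfl] at hins
        rw [hins]
        show pvShift i m ((PySem.Dict.mk (pvMinj m t)).insert (pvRes m j) j).items = _
        have hcon : (PySem.Dict.mk (pvMinj m t)).contains (pvRes m j) = true := by
          rw [PySem.Dict.contains_eq_isSome_get?]
          rw [show (pvMinj m t) = (PySem.Set.ofList (t.map (pvRes m))).map (fun r => (r, pvMin m t r)) from rfl]
          rw [pv_get?_minj, if_pos h]; rfl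
        rw [PySem.Dict.items_insert_of_contains _ j hcon]
        show pvShift i m ((pvMinj m t).map _) = pvShift i m ((pvMinj m t).map _)
        congr 1
        refine List.map_congr_left (fun p hp => ?_)
        by_cases he : p.1 = pvRes m j
        · simp only [he, beq_self_eq_true, if_pos]
          have : min (pvMin m t (pvRes m j)) j = j := by omega
          rw [this]
        · simp [he]
      · rw [if_neg hgt]
        show pvShift i m (pvMinj m t) = _
        congr 1
        have hmap : (pvMinj m t).map
            (fun p => if p.1 == pvRes m j then (pvRes m j, min (pvMin m t (pvRes m j)) j) else p)
            = (pvMinj m t).map id := by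
          refine List.map_congr_left (fun p hp => ?_)
          by_cases he : p.1 = pvRes m j
          · obtain ⟨r, hrmem, hpe⟩ := List.mem_map.1 hp
            have h1 : p.1 = r := by rw [← hpe]
            have hrj : r = pvRes m j := by rw [← h1, he]
            subst hrj
            rw [← hpe]
            simp only [beq_self_eq_true, if_pos]
            have hmin : min (pvMin m t (pvRes m j)) j = pvMin m t (pvRes m j) := by omega
            rw [hmin]
            rfl
          · simp [he]
        rw [hmap, List.map_id]
    · rw [if_neg h, dif_neg h]
      have hcon : (PySem.Dict.mk (pvMinj m t)).contains (pvRes m j) = false := by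
        rw [PySem.Dict.contains_eq_isSome_get?]
        rw [show (pvMinj m t) = (PySem.Set.ofList (t.map (pvRes m))).map (fun r => (r, pvMin m t r)) from rfl]
        rw [pv_get?_minj, if_neg h]; rfl
      show ((PySem.Dict.mk (pvShift i m (pvMinj m t))).insert (PySem.Int.mod (i + pvRes m j) m) j).items
        = pvShift i m (pvMinj m t ++ [(pvRes m j, j)])
      rw [show (PySem.Dict.mk (pvShift i m (pvMinj m t))).insert (PySem.Int.mod (i + pvRes m j) m) j
            = PySem.Dict.mk (pvShift i m ((PySem.Dict.mk (pvMinj m t)).insert (pvRes m j) j).items)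
          from pv_insert_shift i m hm (PySem.Dict.mk (pvMinj m t)) (pv_minj_keys m hm t) (pvRes m j) j hr']
      show pvShift i m ((PySem.Dict.mk (pvMinj m t)).insert (pvRes m j) j).items = _
      rw [PySem.Dict.items_insert_of_not_contains _ j (by simp [hcon])]


lemma pv_graph_items (Set_ : List Int) (m : Int) :
    ((PySem.List.pyRange 0 m 1).foldl
      (fun g i => g.insert i (Set_.foldl (pvStepA m i) PySem.Dict.empty))
      (PySem.Dict.empty : PySem.Dict Int (PySem.Dict Int Int))).items
    = (PySem.List.pyRange 0 m 1).map (fun i => (i, Set_.foldl (pvStepA m i) PySem.Dict.empty)) := by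
  have h := PySem.Dict.items_foldl_insert_fresh (PySem.List.pyRange 0 m 1)
      (fun i => i) (fun i => Set_.foldl (pvStepA m i) PySem.Dict.empty)
      (PySem.Dict.empty : PySem.Dict Int (PySem.Dict Int Int))
      (fun a _ => PySem.Dict.contains_empty a)
      (by simpa using PySem.List.nodup_pyRange_one 0 m)
  simpa using h

-- stage 1 of the B port is the ofList of residues
lemma pv_order_eq (m : Int) (l : List Int) :
    l.foldl (fun s j => PySem.Set.add s (PySem.Int.mod j m)) PySem.Set.empty
      = PySem.Set.ofList (l.map (pvRes m)) := by
  rw [← PySem.Set.update_map_eq_foldl_add]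
  exact PySem.Set.update_nil_left _

-- ===== VERDICT (by name: the statement is the Claim_ definition above) =====
theorem make_GreedyGraph_spec : Claim_equal_make_GreedyGraph := by
  intro Set_ _ hpre
  unfold Spec_make_GreedyGraph make_GreedyGraph make_GreedyGraph_alt
  rcases hmin : PySem.List.min? Set_ (fun x => x) with _ | m
  · rfl
  · simp only
    by_cases hm : m ≤ 0
    · rw [if_pos hm, PySem.List.pyRange_one_eq_nil (by omega), List.foldl_nil]
      rfl
    · rw [if_neg hm, pv_graph_items, List.map_map, pv_order_eq]
      refine List.map_congr_left (fun i _ => ?_)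
      show (i, (Set_.foldl (pvStepA m i) PySem.Dict.empty).items) = _
      rw [pv_row_eq m i (by omega) Set_]
      rfl
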